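-- pv_equiv track=rewrite | github.com/marclucas2-cloud/Tplatform | core/crypto/entry_timing.py | _calculate_delay_to_optimal
-- ===== SOURCE A (Python) =====
-- MAX_DELAY_HOURS = 6
--
-- def _calculate_delay_to_optimal(
--
--     current_hour: int,
--     optimal_hours: list[int],
-- ) -> int:
--     """Calculate hours to wait until the next optimal window.
--
--     Wraps around midnight. Capped at MAX_DELAY_HOURS.
--
--     Args:
--         current_hour: Current hour UTC (0-23).
--         optimal_hours: List of optimal hours.
--
--     Returns:
--         Number of hours to delay (0 if already optimal, capped at 6).
--     """
--     if not optimal_hours: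
--         return 0
--
--     if current_hour in optimal_hours:
--         return 0
--
--     # Find the nearest optimal hour forward (wrapping at 24)
--     min_delay = MAX_DELAY_HOURS + 1
--
--     for opt_hour in optimal_hours:
--         delay = (opt_hour - current_hour) % 24
--         if delay == 0:
--             delay = 24  # full wrap
--         if delay < min_delay:
--             min_delay = delay
--
--     # Rule 3: Cap at MAX_DELAY_HOURS
--     if min_delay > MAX_DELAY_HOURS:
--         return MAX_DELAY_HOURS
--
--     return min_delay
-- ===== SOURCE B (Python) =====
-- MAX_DELAY_HOURS = 6
--
--
-- def _calculate_delay_to_optimal(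
--     current_hour: int,
--     optimal_hours: list[int],
-- ) -> int:
--     """Hours to wait until the next optimal window, scanning the delay space."""
--     if not optimal_hours:
--         return 0
--     if current_hour in optimal_hours:
--         return 0
--     targets = {h % 24 for h in optimal_hours}
--     for delta in range(1, MAX_DELAY_HOURS + 1):
--         if (current_hour + delta) % 24 in targets:
--             return delta
--     return MAX_DELAY_HOURS
-- ===== Notes on version B (the rewrite author's own statement) =====
-- stated objective: alternative
-- what changed: B scans the six candidate delays in order and returns the first whose target hour (mod 24) is in a precomputed set of optimal hours mod 24, instead of A's minimisation of wrap-around delays over the hour list.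
import Mathlib
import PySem

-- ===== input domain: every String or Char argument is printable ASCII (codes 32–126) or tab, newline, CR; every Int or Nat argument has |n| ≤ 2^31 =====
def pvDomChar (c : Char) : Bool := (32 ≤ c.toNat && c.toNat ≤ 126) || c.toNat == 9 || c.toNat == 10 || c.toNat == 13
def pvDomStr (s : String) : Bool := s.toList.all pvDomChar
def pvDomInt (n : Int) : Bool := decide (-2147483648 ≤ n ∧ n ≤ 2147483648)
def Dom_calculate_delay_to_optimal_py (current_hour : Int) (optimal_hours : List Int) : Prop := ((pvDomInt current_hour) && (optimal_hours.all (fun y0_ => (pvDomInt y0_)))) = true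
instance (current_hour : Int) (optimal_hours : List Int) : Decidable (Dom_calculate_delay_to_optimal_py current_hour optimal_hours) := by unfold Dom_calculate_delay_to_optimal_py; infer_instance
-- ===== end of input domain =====

-- B replaces A's minimisation over the hour list by a scan of the six candidate delays
-- with a set of hours-mod-24 (alternative decomposition, same cost).

-- ===== PORT A =====
def calculate_delay_to_optimal_py (current_hour : Int) (optimal_hours : List Int) : Int :=
  if optimal_hours = [] then 0
  else if optimal_hours.contains current_hour then 0
  else
    -- min_delay = MAX_DELAY_HOURS + 1 = 7; for-loop over optimal_hours as a foldl
    let min_delay := optimal_hours.foldl (fun min_delay opt_hour =>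
      let delay := PySem.Int.mod (opt_hour - current_hour) 24
      let delay := if delay = 0 then 24 else delay
      if delay < min_delay then delay else min_delay) 7
    if min_delay > 6 then 6 else min_delay

-- ===== PORT B =====
def calculate_delay_to_optimal_py_alt (current_hour : Int) (optimal_hours : List Int) : Int :=
  if optimal_hours = [] then 0
  else if optimal_hours.contains current_hour then 0
  else
    let targets : PySem.Set Int := PySem.Set.ofList (optimal_hours.map (fun h => PySem.Int.mod h 24))
    -- for delta in range(1, 7): return first delta with (current_hour + delta) % 24 in targets
    match (PySem.List.pyRange 1 7 1).find?
        (fun delta => targets.contains (PySem.Int.mod (current_hour + delta) 24)) with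
    | some delta => delta
    | none => 6

-- ===== PRECONDITION & SPEC =====
def Spec_calculate_delay_to_optimal_py (current_hour : Int) (optimal_hours : List Int) (out : Int) : Prop := out = calculate_delay_to_optimal_py_alt current_hour optimal_hours
instance (current_hour : Int) (optimal_hours : List Int) (out : Int) : Decidable (Spec_calculate_delay_to_optimal_py current_hour optimal_hours out) := by unfold Spec_calculate_delay_to_optimal_py; infer_instance

-- ===== CLAIM (what is proved, stated in full; the proofs are below) =====
def Claim_equal_calculate_delay_to_optimal_py : Prop := ∀ (current_hour : Int) (optimal_hours : List Int), Dom_calculate_delay_to_optimal_py current_hour optimal_hours → Spec_calculate_delay_to_optimal_py current_hour optimal_hours (calculate_delay_to_optimal_py current_hour optimal_hours)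

-- ===== LEMMAS AND PROOFS =====

-- A's adjusted forward delay from cur to hour o, in [1, 24]
def pvDelay (cur o : Int) : Int :=
  let d := PySem.Int.mod (o - cur) 24
  if d = 0 then 24 else d

theorem pvDelay_bounds (cur o : Int) : 1 ≤ pvDelay cur o ∧ pvDelay cur o ≤ 24 := by
  have h1 := PySem.Int.mod_nonneg (o - cur) (b := 24) (by norm_num)
  have h2 := PySem.Int.mod_lt (o - cur) (b := 24) (by norm_num)
  simp only [pvDelay]
  split <;> omega

-- A's loop body is minimisation by pvDelay
theorem pvStep_eq (cur : Int) : (fun (m o : Int) =>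
    let d := PySem.Int.mod (o - cur) 24
    let d := if d = 0 then 24 else d
    if d < m then d else m) = fun m o => if pvDelay cur o < m then pvDelay cur o else m := by
  funext m o
  simp only [pvDelay]

-- invariant of A's minimising fold
theorem pvFold_inv (cur : Int) (hs : List Int) (a : Int) (ha : 1 ≤ a) :
    1 ≤ hs.foldl (fun m o => if pvDelay cur o < m then pvDelay cur o else m) a ∧
    hs.foldl (fun m o => if pvDelay cur o < m then pvDelay cur o else m) a ≤ a ∧
    (∀ o ∈ hs, hs.foldl (fun m o => if pvDelay cur o < m then pvDelay cur o else m) a ≤ pvDelay cur o) ∧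
    (hs.foldl (fun m o => if pvDelay cur o < m then pvDelay cur o else m) a = a ∨
      ∃ o ∈ hs, pvDelay cur o = hs.foldl (fun m o => if pvDelay cur o < m then pvDelay cur o else m) a) := by
  induction hs generalizing a with
  | nil => simp [ha]
  | cons x xs ih =>
    have hb := pvDelay_bounds cur x
    simp only [List.foldl_cons]
    by_cases hlt : pvDelay cur x < a
    · rw [if_pos hlt]
      obtain ⟨h1, h2, h3, h4⟩ := ih (pvDelay cur x) (by omega)
      refine ⟨h1, by omega, ?_, ?_⟩
      · intro o ho
        rcases List.mem_cons.mp ho with rfl | ho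
        · omega
        · exact h3 o ho
      · rcases h4 with h4 | ⟨o, ho, hfo⟩
        · exact Or.inr ⟨x, List.mem_cons_self, h4.symm⟩
        · exact Or.inr ⟨o, List.mem_cons_of_mem _ ho, hfo⟩
    · rw [if_neg hlt]
      obtain ⟨h1, h2, h3, h4⟩ := ih a ha
      refine ⟨h1, h2, ?_, ?_⟩
      · intro o ho
        rcases List.mem_cons.mp ho with rfl | ho
        · omega
        · exact h3 o ho
      · rcases h4 with h4 | ⟨o, ho, hfo⟩
        · exact Or.inl h4
        · exact Or.inr ⟨o, List.mem_cons_of_mem _ ho, hfo⟩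

-- B's membership test at delay δ ∈ [1,6] holds iff some optimal hour has delay exactly δ
theorem pvMemP (cur δ : Int) (hs : List Int) (h1 : 1 ≤ δ) (h6 : δ ≤ 6) :
    ((PySem.Set.ofList (hs.map (fun h => PySem.Int.mod h 24))).contains
      (PySem.Int.mod (cur + δ) 24) = true) ↔ ∃ o ∈ hs, pvDelay cur o = δ := by
  have h24 : (0:Int) < 24 := by norm_num
  have hδ : δ % 24 = δ := Int.emod_eq_of_lt (by omega) (by omega)
  have hc : (PySem.Set.ofList (hs.map (fun h => PySem.Int.mod h 24))).contains
      (PySem.Int.mod (cur + δ) 24) = true ↔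
      PySem.Int.mod (cur + δ) 24 ∈ hs.map (fun h => PySem.Int.mod h 24) := by
    simp [PySem.Set.mem_ofList]
  rw [hc, List.mem_map]
  constructor
  · rintro ⟨o, ho, heq⟩
    refine ⟨o, ho, ?_⟩
    rw [PySem.Int.mod_eq_emod_of_pos h24, PySem.Int.mod_eq_emod_of_pos h24] at heq
    have h0 : (o - (cur + δ)) % 24 = 0 := Int.emod_eq_emod_iff_emod_sub_eq_zero.mp heq
    have hd : (o - cur) % 24 = δ % 24 := by
      apply Int.emod_eq_emod_iff_emod_sub_eq_zero.mpr
      have he : o - cur - δ = o - (cur + δ) := by ring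
      rw [he]
      exact h0
    simp only [pvDelay]
    rw [PySem.Int.mod_eq_emod_of_pos h24, hd, hδ]
    have hne : ¬ δ = 0 := by omega
    simp [hne]
  · rintro ⟨o, ho, hfo⟩
    refine ⟨o, ho, ?_⟩
    simp only [pvDelay] at hfo
    rw [PySem.Int.mod_eq_emod_of_pos h24] at hfo
    rw [PySem.Int.mod_eq_emod_of_pos h24, PySem.Int.mod_eq_emod_of_pos h24]
    have hd : (o - cur) % 24 = δ := by
      split at hfo
      · omega
      · exact hfo
    apply Int.emod_eq_emod_iff_emod_sub_eq_zero.mpr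
    have he : o - (cur + δ) = (o - cur) - δ := by ring
    rw [he, Int.sub_emod, hd, hδ]
    simp

-- combinatorial core: the first δ ∈ [1..6] satisfying P is m exactly when m ≤ 6,
-- given that P fails below m and holds at m (if m ≤ 6)
theorem pvFindFirst (P : Int → Bool) (m : Int) (h1 : 1 ≤ m) (h7 : m ≤ 7)
    (hlt : ∀ δ, 1 ≤ δ → δ < m → P δ = false)
    (hm : m ≤ 6 → P m = true) :
    ([1, 2, 3, 4, 5, 6] : List Int).find? P = if m ≤ 6 then some m else none := by
  interval_cases m
  · simp [List.find?, hm (by norm_num)]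
  · simp [List.find?, hlt 1 (by norm_num) (by norm_num), hm (by norm_num)]
  · simp [List.find?, hlt 1 (by norm_num) (by norm_num), hlt 2 (by norm_num) (by norm_num),
      hm (by norm_num)]
  · simp [List.find?, hlt 1 (by norm_num) (by norm_num), hlt 2 (by norm_num) (by norm_num),
      hlt 3 (by norm_num) (by norm_num), hm (by norm_num)]
  · simp [List.find?, hlt 1 (by norm_num) (by norm_num), hlt 2 (by norm_num) (by norm_num),
      hlt 3 (by norm_num) (by norm_num), hlt 4 (by norm_num) (by norm_num), hm (by norm_num)]
  · simp [List.find?, hlt 1 (by norm_num) (by norm_num), hlt 2 (by norm_num) (by norm_num),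
      hlt 3 (by norm_num) (by norm_num), hlt 4 (by norm_num) (by norm_num),
      hlt 5 (by norm_num) (by norm_num), hm (by norm_num)]
  · simp [List.find?, hlt 1 (by norm_num) (by norm_num), hlt 2 (by norm_num) (by norm_num),
      hlt 3 (by norm_num) (by norm_num), hlt 4 (by norm_num) (by norm_num),
      hlt 5 (by norm_num) (by norm_num), hlt 6 (by norm_num) (by norm_num)]

theorem pvRange16 : PySem.List.pyRange 1 7 1 = ([1, 2, 3, 4, 5, 6] : List Int) := by decide

-- ===== VERDICT (by name: the statement is the Claim_ definition above) =====
theorem calculate_delay_to_optimal_py_spec : Claim_equal_calculate_delay_to_optimal_py := by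
  intro cur hs _
  unfold Spec_calculate_delay_to_optimal_py calculate_delay_to_optimal_py
    calculate_delay_to_optimal_py_alt
  by_cases hnil : hs = []
  · rw [if_pos hnil, if_pos hnil]
  · rw [if_neg hnil, if_neg hnil]
    by_cases hmem : hs.contains cur
    · rw [if_pos hmem, if_pos hmem]
    · rw [if_neg hmem, if_neg hmem]
      simp only [pvStep_eq cur, pvRange16]
      obtain ⟨h1, h7, hle, hwit⟩ := pvFold_inv cur hs 7 (by norm_num)
      rw [pvFindFirst _ (hs.foldl (fun m o => if pvDelay cur o < m then pvDelay cur o else m) 7)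
        h1 h7 ?_ ?_]
      · by_cases hm6 : hs.foldl (fun m o => if pvDelay cur o < m then pvDelay cur o else m) 7 ≤ 6
        · simp [hm6]
        · simp [hm6]
      · intro δ hδ1 hδm
        by_contra hP
        rw [Bool.not_eq_false] at hP
        obtain ⟨o, ho, hfo⟩ := (pvMemP cur δ hs hδ1 (by omega)).mp hP
        have := hle o ho
        omega
      · intro hm6
        rcases hwit with h | ⟨o, ho, hfo⟩
        · omega
        · exact (pvMemP cur _ hs h1 hm6).mpr ⟨o, ho, hfo⟩
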